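-- pv_equiv track=rewrite | github.com/xyuns-cc/AntCode | packages/antcode_core/src/antcode_core/application/services/logs/log_chunk_receiver.py | _calculate_contiguous_offset
-- ===== SOURCE A (Python) =====
-- def _calculate_contiguous_offset(
--
--     received_offsets: set,
-- ) -> int:
--     """
--     计算已连续写入的最大 offset
--
--     Args:
--         received_offsets: 已接收的分片 offset 集合 (start, end)
--
--     Returns:
--         已连续写入的最大 offset
--     """
--     if not received_offsets:
--         return 0
--
--     # 按起始 offset 排序
--     sorted_offsets = sorted(received_offsets, key=lambda x: x[0])
--
--     # 计算连续区间
--     contiguous_end = 0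
--     for start, end in sorted_offsets:
--         if start <= contiguous_end:
--             # 连续或重叠
--             contiguous_end = max(contiguous_end, end)
--         else:
--             # 有间隙，停止
--             break
--
--     return contiguous_end
-- ===== SOURCE B (Python) =====
-- def _calculate_contiguous_offset(
--     received_offsets: set,
-- ) -> int:
--     """Fixpoint over unsorted scans: grow the run reachable from offset 0."""
--     cur = 0
--     while True:
--         new = cur
--         for start, end in received_offsets:
--             if start <= new and end > new:
--                 new = end
--         if new == cur:
--             return cur
--         cur = new
-- ===== Notes on version B (the rewrite author's own statement) =====
-- stated objective: alternative
-- what changed: Replaces sort-then-merge (sorted scan with early break) by a sort-free fixpoint: repeated unsorted passes that extend the contiguous end with any interval starting at or below it, until a pass changes nothing.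
import Mathlib
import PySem

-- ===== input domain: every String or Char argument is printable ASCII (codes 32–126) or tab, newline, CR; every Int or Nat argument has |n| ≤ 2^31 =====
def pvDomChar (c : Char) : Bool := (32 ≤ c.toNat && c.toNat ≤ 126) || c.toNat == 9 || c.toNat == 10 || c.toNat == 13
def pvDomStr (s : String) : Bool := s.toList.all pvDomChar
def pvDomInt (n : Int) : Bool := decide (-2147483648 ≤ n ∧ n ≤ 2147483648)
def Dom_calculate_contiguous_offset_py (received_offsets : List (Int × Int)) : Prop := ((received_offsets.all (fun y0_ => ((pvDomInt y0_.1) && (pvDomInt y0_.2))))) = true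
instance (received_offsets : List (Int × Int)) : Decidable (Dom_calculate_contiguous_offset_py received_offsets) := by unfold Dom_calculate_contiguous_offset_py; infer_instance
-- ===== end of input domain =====

-- B replaces A's sort-then-merge scan by a sort-free fixpoint of repeated unsorted passes
-- that grow the contiguous end reachable from 0 (objective: alternative algorithm, same results).


-- ===== PORT A =====
-- A's `for start, end in sorted_offsets: if start <= contiguous_end: … else: break` loop
def pvALoop (l : List (Int × Int)) (contiguous_end : Int) : Int :=
  match l with
  | [] => contiguous_end
  | (s, e) :: t =>
      if s ≤ contiguous_end then pvALoop t (max contiguous_end e) else contiguous_end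

def calculate_contiguous_offset_py (received_offsets : List (Int × Int)) : Int :=
  if received_offsets = [] then 0
  else pvALoop (PySem.List.sorted received_offsets (fun x => x.1) false) 0

-- ===== PORT B =====
-- one inner `for start, end in received_offsets` pass of Source B
def pvBPass (l : List (Int × Int)) (new : Int) : Int :=
  l.foldl (fun new p => if p.1 ≤ new ∧ p.2 > new then p.2 else new) new

-- Source B's `while True` loop; fuel = length + 1 passes provably reaches the fixpoint
-- (each changing pass strictly raises `cur` to some interval's end), so this is exact.
def pvBLoop (fuel : Nat) (l : List (Int × Int)) (cur : Int) : Int :=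
  match fuel with
  | 0 => cur
  | f + 1 =>
      let new := pvBPass l cur
      if new = cur then cur else pvBLoop f l new

def calculate_contiguous_offset_py_alt (received_offsets : List (Int × Int)) : Int :=
  pvBLoop (received_offsets.length + 1) received_offsets 0

-- ===== PRECONDITION & SPEC =====
def Spec_calculate_contiguous_offset_py (received_offsets : List (Int × Int)) (out : Int) : Prop := out = calculate_contiguous_offset_py_alt received_offsets
instance (received_offsets : List (Int × Int)) (out : Int) : Decidable (Spec_calculate_contiguous_offset_py received_offsets out) := by unfold Spec_calculate_contiguous_offset_py; infer_instance

-- ===== CLAIM (what is proved, stated in full; the proofs are below) =====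
def Claim_equal_calculate_contiguous_offset_py : Prop := ∀ (received_offsets : List (Int × Int)), Dom_calculate_contiguous_offset_py received_offsets → Spec_calculate_contiguous_offset_py received_offsets (calculate_contiguous_offset_py received_offsets)

-- ===== LEMMAS AND PROOFS =====

-- `c` is closed for `l`: no interval starting at or below c reaches past it
def pvClosed (l : List (Int × Int)) (c : Int) : Prop := ∀ p ∈ l, p.1 ≤ c → p.2 ≤ c

theorem pvALoop_ge (l : List (Int × Int)) (c : Int) : c ≤ pvALoop l c := by
  induction l generalizing c with
  | nil => simp [pvALoop]
  | cons q t ih =>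
      obtain ⟨s, e⟩ := q
      simp only [pvALoop]
      split
      · exact le_trans (le_max_left c e) (ih (max c e))
      · exact le_refl c

theorem pvALoop_closed (l : List (Int × Int)) (c : Int)
    (hs : l.Pairwise (fun p q => p.1 ≤ q.1)) : pvClosed l (pvALoop l c) := by
  induction l generalizing c with
  | nil => intro p hp; simp at hp
  | cons q t ih =>
      obtain ⟨s, e⟩ := q
      rcases List.pairwise_cons.mp hs with ⟨hhead, htail⟩
      intro p hp hple
      simp only [pvALoop] at hple ⊢
      by_cases hsc : s ≤ c
      · simp only [if_pos hsc] at hple ⊢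
        rcases List.mem_cons.mp hp with rfl | hpt
        · exact le_trans (le_trans (le_max_right c e) (pvALoop_ge t (max c e))) (le_refl _)
        · exact ih (max c e) htail p hpt (by simpa [pvALoop, if_pos hsc] using hple)
      · simp only [if_neg hsc] at hple ⊢
        rcases List.mem_cons.mp hp with rfl | hpt
        · exact absurd hple hsc
        · exact absurd (le_trans (hhead p hpt) hple) hsc

theorem pvALoop_le (l : List (Int × Int)) (c d : Int)
    (hd : pvClosed l d) (hc : c ≤ d) : pvALoop l c ≤ d := by
  induction l generalizing c with
  | nil => simpa [pvALoop] using hc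
  | cons q t ih =>
      obtain ⟨s, e⟩ := q
      simp only [pvALoop]
      split
      · refine ih (max c e) (fun p hp => hd p (List.mem_cons_of_mem _ hp)) ?_
        exact max_le hc (hd (s, e) List.mem_cons_self (le_trans ‹s ≤ c› hc))
      · exact hc

theorem pvBPass_ge (l : List (Int × Int)) (c : Int) : c ≤ pvBPass l c := by
  induction l generalizing c with
  | nil => simp [pvBPass]
  | cons q t ih =>
      simp only [pvBPass, List.foldl_cons]
      split
      · exact le_trans (le_of_lt (by assumption : q.1 ≤ c ∧ q.2 > c).2) (ih q.2)
      · exact ih c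

theorem pvBPass_le (l : List (Int × Int)) (c d : Int)
    (hd : pvClosed l d) (hc : c ≤ d) : pvBPass l c ≤ d := by
  induction l generalizing c with
  | nil => simpa [pvBPass] using hc
  | cons q t ih =>
      simp only [pvBPass, List.foldl_cons]
      have ht : pvClosed t d := fun p hp => hd p (List.mem_cons_of_mem _ hp)
      split
      · exact ih q.2 ht (hd q List.mem_cons_self (le_trans (by assumption : q.1 ≤ c ∧ q.2 > c).1 hc))
      · exact ih c ht hc

theorem pvBPass_mem (l : List (Int × Int)) (c : Int) (p : Int × Int)
    (hp : p ∈ l) (hle : p.1 ≤ c) : p.2 ≤ pvBPass l c := by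
  induction l generalizing c with
  | nil => simp at hp
  | cons q t ih =>
      simp only [pvBPass, List.foldl_cons]
      rcases List.mem_cons.mp hp with rfl | hpt
      · split
        · exact pvBPass_ge t p.2
        · have : ¬ p.2 > c := fun h => (by assumption : ¬ (p.1 ≤ c ∧ p.2 > c)) ⟨hle, h⟩
          exact le_trans (not_lt.mp this) (pvBPass_ge t c)
      · split
        · exact ih q.2 hpt (le_trans hle (le_of_lt (by assumption : q.1 ≤ c ∧ q.2 > c).2))
        · exact ih c hpt hle

theorem pvBPass_fix_closed (l : List (Int × Int)) (c : Int)
    (h : pvBPass l c = c) : pvClosed l c := by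
  intro p hp hle
  have := pvBPass_mem l c p hp hle
  omega

-- when a pass changes `c`, the new value is the end of some interval of l
theorem pvBPass_val (l : List (Int × Int)) (c : Int) :
    pvBPass l c = c ∨ ∃ p ∈ l, pvBPass l c = p.2 := by
  induction l generalizing c with
  | nil => left; simp [pvBPass]
  | cons q t ih =>
      simp only [pvBPass, List.foldl_cons]
      split
      · rcases ih q.2 with h | ⟨p, hp, hpe⟩
        · exact Or.inr ⟨q, List.mem_cons_self, h⟩
        · exact Or.inr ⟨p, List.mem_cons_of_mem _ hp, hpe⟩
      · rcases ih c with h | ⟨p, hp, hpe⟩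
        · exact Or.inl h
        · exact Or.inr ⟨p, List.mem_cons_of_mem _ hp, hpe⟩

theorem pvCountP_lt {α : Type} (l : List α) (p q : α → Bool)
    (himp : ∀ a ∈ l, q a = true → p a = true)
    (a0 : α) (ha0 : a0 ∈ l) (hp : p a0 = true) (hq : q a0 = false) :
    l.countP q < l.countP p := by
  induction l with
  | nil => simp at ha0
  | cons b t ih =>
      have himpt : ∀ a ∈ t, q a = true → p a = true :=
        fun a ha => himp a (List.mem_cons_of_mem _ ha)
      have hmono : t.countP q ≤ t.countP p := List.countP_mono_left himpt
      rcases List.mem_cons.mp ha0 with rfl | ha0t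
      · simp [hp, hq]
        have := List.countP_mono_left himpt
        omega
      · have h1 := ih himpt ha0t
        by_cases hqb : q b = true
        · simp [hqb, himp b List.mem_cons_self hqb]; omega
        · have hqb' : q b = false := by simpa using hqb
          by_cases hpb : p b = true
          · simp [hqb', hpb]; omega
          · have hpb' : p b = false := by simpa using hpb
            simp [hqb', hpb']; omega

-- with enough fuel the loop reaches a fixpoint of the pass
theorem pvBLoop_fix (l : List (Int × Int)) (fuel : Nat) (c : Int)
    (hf : l.countP (fun p => decide (c < p.2)) < fuel) :
    pvBPass l (pvBLoop fuel l c) = pvBLoop fuel l c := by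
  induction fuel generalizing c with
  | zero => omega
  | succ f ih =>
      simp only [pvBLoop]
      by_cases h : pvBPass l c = c
      · simp [h]
      · simp only [h, if_false]
        apply ih
        have hgt : c < pvBPass l c := lt_of_le_of_ne (pvBPass_ge l c) (Ne.symm h)
        rcases pvBPass_val l c with h' | ⟨p, hp, hpe⟩
        · exact absurd h' h
        · have hlt : l.countP (fun q => decide (pvBPass l c < q.2)) <
              l.countP (fun q => decide (c < q.2)) := by
            refine pvCountP_lt l _ _ ?_ p hp ?_ ?_
            · intro a _ ha
              simp only [decide_eq_true_eq] at ha ⊢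
              exact lt_of_lt_of_le hgt (le_of_lt ha)
            · simp only [decide_eq_true_eq]; omega
            · simp only [decide_eq_false_iff_not]; omega
          omega

theorem pvBLoop_ge (fuel : Nat) (l : List (Int × Int)) (c : Int) : c ≤ pvBLoop fuel l c := by
  induction fuel generalizing c with
  | zero => simp [pvBLoop]
  | succ f ih =>
      simp only [pvBLoop]
      split
      · exact le_refl c
      · exact le_trans (pvBPass_ge l c) (ih (pvBPass l c))

theorem pvBLoop_le (fuel : Nat) (l : List (Int × Int)) (c d : Int)
    (hd : pvClosed l d) (hc : c ≤ d) : pvBLoop fuel l c ≤ d := by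
  induction fuel generalizing c with
  | zero => simpa [pvBLoop] using hc
  | succ f ih =>
      simp only [pvBLoop]
      split
      · exact hc
      · exact ih (pvBPass l c) (pvBPass_le l c d hd hc)

-- ===== VERDICT (by name: the statement is the Claim_ definition above) =====
theorem calculate_contiguous_offset_py_spec : Claim_equal_calculate_contiguous_offset_py := by
  intro ro _
  unfold Spec_calculate_contiguous_offset_py
  unfold calculate_contiguous_offset_py calculate_contiguous_offset_py_alt
  by_cases hro : ro = []
  · subst hro
    simp [pvBLoop, pvBPass]
  · simp only [if_neg hro]
    set srt := PySem.List.sorted ro (fun x : Int × Int => x.1) false with hsrt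
    set a := pvALoop srt 0 with ha
    set b := pvBLoop (ro.length + 1) ro 0 with hb
    have hmem : ∀ p : Int × Int, p ∈ srt ↔ p ∈ ro := fun p => PySem.List.mem_sorted ro (fun x => x.1) false p
    -- a is closed for ro and nonnegative
    have haclosed : pvClosed ro a := by
      intro p hp
      exact pvALoop_closed srt 0 (PySem.List.sorted_pairwise ro (fun x => x.1)) p ((hmem p).mpr hp)
    have hage : (0 : Int) ≤ a := pvALoop_ge srt 0
    -- b is closed for ro and nonnegative
    have hbfix : pvBPass ro b = b := by
      apply pvBLoop_fix
      have : ro.countP (fun p => decide ((0 : Int) < p.2)) ≤ ro.length := List.countP_le_length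
      omega
    have hbclosed : pvClosed ro b := pvBPass_fix_closed ro b hbfix
    have hbge : (0 : Int) ≤ b := pvBLoop_ge _ ro 0
    -- each is below the other's closed point
    have hab : a ≤ b := by
      apply pvALoop_le
      · intro p hp; exact hbclosed p ((hmem p).mp hp)
      · exact hbge
    have hba : b ≤ a := pvBLoop_le _ ro 0 a haclosed hage
    omega
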